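-- pv_equiv track=rewrite | github.com/garland3/waterproject | helper.py | days_to_cron_numbers
-- ===== SOURCE A (Python) =====
-- def days_to_cron_numbers(days):
--     # Mapping of days to cron numbers
--     day_mapping = {
--         'sunday': 0,
--         'monday': 1,
--         'tuesday': 2,
--         'wednesday': 3,
--         'thursday': 4,
--         'friday': 5,
--         'saturday': 6
--     }
--
--     # Split the input string and map the days to their numbers
--     day_list = days.lower().split(',')
--     # convert to int and add to a list
--     # sort
--     # convert to string
--     # cron_numbers = [str(day_mapping[day.strip()]) for day in day_list if day.strip() in day_mapping]
--     cron_numbers_int_list = [day_mapping[day.strip()] for day in day_list if day.strip() in day_mapping]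
--     cron_numbers_int_list.sort()
--     cron_numbers = [str(day) for day in cron_numbers_int_list]
--
--     # Join the numbers into a comma-separated string
--     return ','.join(cron_numbers)
-- ===== SOURCE B (Python) =====
-- def days_to_cron_numbers(days):
--     # Canonical table in cron order; counting tokens, then emitting blocks in
--     # table order, yields the sorted result without any sort call.
--     day_order = [
--         ('sunday', 0),
--         ('monday', 1),
--         ('tuesday', 2),
--         ('wednesday', 3),
--         ('thursday', 4),
--         ('friday', 5),
--         ('saturday', 6),
--     ]
--     counts = {}
--     for tok in days.lower().split(','):
--         t = tok.strip()
--         counts[t] = counts.get(t, 0) + 1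
--     out = []
--     for name, num in day_order:
--         out.extend([str(num)] * counts.get(name, 0))
--     return ','.join(out)
-- ===== Notes on version B (the rewrite author's own statement) =====
-- stated objective: alternative
-- what changed: B replaces filter-lookup-then-sort with a single counting pass over the tokens followed by a scan of the canonical day table, emitting each day number as many times as it was counted, so no sort call is needed.
import Mathlib
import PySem

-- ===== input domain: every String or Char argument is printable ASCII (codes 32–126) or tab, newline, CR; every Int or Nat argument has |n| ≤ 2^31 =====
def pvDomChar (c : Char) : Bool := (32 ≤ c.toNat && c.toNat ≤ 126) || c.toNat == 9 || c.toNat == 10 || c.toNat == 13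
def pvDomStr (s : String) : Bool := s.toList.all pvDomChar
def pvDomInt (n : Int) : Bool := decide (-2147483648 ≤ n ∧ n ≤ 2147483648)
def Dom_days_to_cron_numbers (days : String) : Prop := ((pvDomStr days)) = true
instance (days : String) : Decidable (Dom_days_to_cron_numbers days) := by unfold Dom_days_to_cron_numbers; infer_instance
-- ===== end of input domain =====

-- B counts the stripped tokens once and emits the day numbers by scanning the
-- canonical table in order, so the sort call of A disappears (objective: alternative).

-- ===== PORT A =====
def pvDayMapping : PySem.Dict String Int :=
  PySem.Dict.ofList [("sunday", 0), ("monday", 1), ("tuesday", 2), ("wednesday", 3),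
                     ("thursday", 4), ("friday", 5), ("saturday", 6)]

def days_to_cron_numbers (days : String) : String :=
  let dayList := (PySem.Str.split? (PySem.Str.lower days) ",").getD []  -- sep "," ≠ "", so split? is always some
  -- list comprehension with guard; the guard makes the lookup total, so getD 0 never uses its default
  let intList := (dayList.filter (fun d => pvDayMapping.contains (PySem.Str.strip d))).map
      (fun d => (pvDayMapping.get? (PySem.Str.strip d)).getD 0)
  let sortedInts := PySem.List.sorted intList (fun x => x) false
  PySem.Str.join "," (sortedInts.map PySem.Int.toStr)

-- ===== PORT B =====
def pvDayOrder : List (String × Int) :=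
  [("sunday", 0), ("monday", 1), ("tuesday", 2), ("wednesday", 3),
   ("thursday", 4), ("friday", 5), ("saturday", 6)]

def days_to_cron_numbers_alt (days : String) : String :=
  let counts := (((PySem.Str.split? (PySem.Str.lower days) ",").getD []).map PySem.Str.strip).foldl
      (fun d t => d.insert t (d.getD t 0 + 1)) (PySem.Dict.empty : PySem.Dict String Int)
  let out := pvDayOrder.foldl
      (fun acc p => acc ++ List.replicate (counts.getD p.1 0).toNat (PySem.Int.toStr p.2))
      ([] : List String)
  PySem.Str.join "," out

-- ===== PRECONDITION & SPEC =====
def Spec_days_to_cron_numbers (days : String) (out : String) : Prop := out = days_to_cron_numbers_alt days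
instance (days : String) (out : String) : Decidable (Spec_days_to_cron_numbers days out) := by unfold Spec_days_to_cron_numbers; infer_instance

-- ===== CLAIM (what is proved, stated in full; the proofs are below) =====
def Claim_equal_days_to_cron_numbers : Prop := ∀ (days : String), Dom_days_to_cron_numbers days → Spec_days_to_cron_numbers days (days_to_cron_numbers days)

-- ===== LEMMAS AND PROOFS =====

-- blocks of equal values, emitted in nondecreasing order of value, form a nondecreasing list
theorem pvBlocksPairwise (f : String → Nat) :
    ∀ (ps : List (String × Int)), ps.Pairwise (fun a b => a.2 ≤ b.2) →
      (ps.flatMap (fun p => List.replicate (f p.1) p.2)).Pairwise (· ≤ ·) := by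
  intro ps h
  induction ps with
  | nil => simp
  | cons p ps ih =>
    rw [List.flatMap_cons]
    rw [List.pairwise_cons] at h
    apply List.pairwise_append.2
    refine ⟨?_, ih h.2, ?_⟩
    · exact List.pairwise_replicate.2 (Or.inr le_rfl)
    · intro a ha b hb
      obtain ⟨q, hq, hbq⟩ := List.mem_flatMap.1 hb
      rw [List.eq_of_mem_replicate ha, List.eq_of_mem_replicate hbq]
      exact h.1 q hq

-- a token that is no key of ps leaves every block of ps unchanged
theorem pvBlocksSkip (t : String) (rest : List String) :
    ∀ (ps : List (String × Int)), (∀ p ∈ ps, p.1 ≠ t) →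
      ps.flatMap (fun p => List.replicate ((t :: rest).count p.1) p.2)
        = ps.flatMap (fun p => List.replicate (rest.count p.1) p.2) := by
  intro ps h
  induction ps with
  | nil => rfl
  | cons p ps ih =>
    rw [List.flatMap_cons, List.flatMap_cons, ih (fun q hq => h q (List.mem_cons_of_mem _ hq))]
    have : (t :: rest).count p.1 = rest.count p.1 := by
      rw [List.count_cons]
      simp [Ne.symm (h p List.mem_cons_self)]
    rw [this]

-- a token that is the (unique) key `name` grows exactly the `name` block by one
theorem pvBlocksHit (ps1 ps2 : List (String × Int)) (name : String) (v : Int) (rest : List String)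
    (h1 : ∀ p ∈ ps1, p.1 ≠ name) (h2 : ∀ p ∈ ps2, p.1 ≠ name) :
    ((ps1 ++ (name, v) :: ps2).flatMap
        (fun p => List.replicate ((name :: rest).count p.1) p.2)).Perm
      (v :: (ps1 ++ (name, v) :: ps2).flatMap
        (fun p => List.replicate (rest.count p.1) p.2)) := by
  rw [List.flatMap_append, List.flatMap_append, List.flatMap_cons, List.flatMap_cons,
      pvBlocksSkip name rest ps1 h1, pvBlocksSkip name rest ps2 h2]
  have hc : (name :: rest).count name = rest.count name + 1 := by
    rw [List.count_cons]; simp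
  rw [hc, List.replicate_succ]
  exact List.perm_middle.trans (List.Perm.cons v (by simp))

-- the canonical blocks are a permutation of A's filtered lookup list
theorem pvBlocksPerm (toks : List String) :
    (pvDayOrder.flatMap (fun p => List.replicate (toks.count p.1) p.2)).Perm
      ((toks.filter (fun t => pvDayMapping.contains t)).map
        (fun t => (pvDayMapping.get? t).getD 0)) := by
  induction toks with
  | nil => simp [pvDayOrder]
  | cons t rest ih =>
    by_cases hc : pvDayMapping.contains t = true
    · have ht : t = "sunday" ∨ t = "monday" ∨ t = "tuesday" ∨ t = "wednesday" ∨
          t = "thursday" ∨ t = "friday" ∨ t = "saturday" := by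
        rw [show pvDayMapping = PySem.Dict.mk [("sunday", 0), ("monday", 1), ("tuesday", 2), ("wednesday", 3), ("thursday", 4), ("friday", 5), ("saturday", 6)] from by decide,
            PySem.Dict.contains_mk] at hc
        simp at hc
        tauto
      rw [List.filter_cons_of_pos hc, List.map_cons]
      rcases ht with h | h | h | h | h | h | h <;> subst h
      · have hv : (pvDayMapping.get? "sunday").getD 0 = (0 : Int) := by decide
        rw [hv]
        exact (pvBlocksHit [] [("monday", 1), ("tuesday", 2), ("wednesday", 3), ("thursday", 4), ("friday", 5), ("saturday", 6)] "sunday" 0 rest (by decide) (by decide)).trans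
          (List.Perm.cons _ ih)
      · have hv : (pvDayMapping.get? "monday").getD 0 = (1 : Int) := by decide
        rw [hv]
        exact (pvBlocksHit [("sunday", 0)] [("tuesday", 2), ("wednesday", 3), ("thursday", 4), ("friday", 5), ("saturday", 6)] "monday" 1 rest (by decide) (by decide)).trans
          (List.Perm.cons _ ih)
      · have hv : (pvDayMapping.get? "tuesday").getD 0 = (2 : Int) := by decide
        rw [hv]
        exact (pvBlocksHit [("sunday", 0), ("monday", 1)] [("wednesday", 3), ("thursday", 4), ("friday", 5), ("saturday", 6)] "tuesday" 2 rest (by decide) (by decide)).trans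
          (List.Perm.cons _ ih)
      · have hv : (pvDayMapping.get? "wednesday").getD 0 = (3 : Int) := by decide
        rw [hv]
        exact (pvBlocksHit [("sunday", 0), ("monday", 1), ("tuesday", 2)] [("thursday", 4), ("friday", 5), ("saturday", 6)] "wednesday" 3 rest (by decide) (by decide)).trans
          (List.Perm.cons _ ih)
      · have hv : (pvDayMapping.get? "thursday").getD 0 = (4 : Int) := by decide
        rw [hv]
        exact (pvBlocksHit [("sunday", 0), ("monday", 1), ("tuesday", 2), ("wednesday", 3)] [("friday", 5), ("saturday", 6)] "thursday" 4 rest (by decide) (by decide)).trans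
          (List.Perm.cons _ ih)
      · have hv : (pvDayMapping.get? "friday").getD 0 = (5 : Int) := by decide
        rw [hv]
        exact (pvBlocksHit [("sunday", 0), ("monday", 1), ("tuesday", 2), ("wednesday", 3), ("thursday", 4)] [("saturday", 6)] "friday" 5 rest (by decide) (by decide)).trans
          (List.Perm.cons _ ih)
      · have hv : (pvDayMapping.get? "saturday").getD 0 = (6 : Int) := by decide
        rw [hv]
        exact (pvBlocksHit [("sunday", 0), ("monday", 1), ("tuesday", 2), ("wednesday", 3), ("thursday", 4), ("friday", 5)] [] "saturday" 6 rest (by decide) (by decide)).trans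
          (List.Perm.cons _ ih)
    · have hne : ∀ p ∈ pvDayOrder, p.1 ≠ t := by
        intro p hp h
        apply hc
        subst h
        fin_cases hp <;> decide
      rw [List.filter_cons_of_neg (by simpa using hc),
          pvBlocksSkip t rest pvDayOrder hne]
      exact ih

-- ===== VERDICT (by name: the statement is the Claim_ definition above) =====
theorem days_to_cron_numbers_spec : Claim_equal_days_to_cron_numbers := by
  intro days _
  unfold Spec_days_to_cron_numbers days_to_cron_numbers days_to_cron_numbers_alt
  simp only [PySem.Dict.foldl_insert_getD_add_one_eq_counter]
  rw [PySem.List.foldl_append_eq_flatMap]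
  have hA : (((PySem.Str.split? (PySem.Str.lower days) ",").getD []).filter
        (fun d => pvDayMapping.contains (PySem.Str.strip d))).map
        (fun d => (pvDayMapping.get? (PySem.Str.strip d)).getD 0)
      = ((((PySem.Str.split? (PySem.Str.lower days) ",").getD []).map PySem.Str.strip).filter
          (fun t => pvDayMapping.contains t)).map
          (fun t => (pvDayMapping.get? t).getD 0) := by
    rw [List.filter_map, List.map_map]
    rfl
  rw [hA]
  generalize (List.map PySem.Str.strip ((PySem.Str.split? (PySem.Str.lower days) ",").getD [])) = toks
  have hpw : pvDayOrder.Pairwise (fun a b => a.2 ≤ b.2) := by decide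
  have hs := PySem.List.sorted_id_eq_of_perm_of_pairwise
      ((toks.filter (fun t => pvDayMapping.contains t)).map (fun t => (pvDayMapping.get? t).getD 0))
      (pvDayOrder.flatMap (fun p => List.replicate (toks.count p.1) p.2))
      (pvBlocksPerm toks) (pvBlocksPairwise (fun n => toks.count n) pvDayOrder hpw)
  rw [hs]
  simp [List.map_flatMap, PySem.Dict.getD_counter]
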